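-- pv_equiv track=rewrite | github.com/manwar/perlweeklychallenge-club | challenge-282/roger-bell-west/python/ch-2.py | changingkeys
-- ===== SOURCE A (Python) =====
-- def changingkeys(a):
--   oc = "x"
--   out = 0
--   for i, c in enumerate(a.lower()):
--     if i == 0:
--       oc = c
--     elif c != oc:
--       oc = c
--       out += 1
--   return out
-- ===== SOURCE B (Python) =====
-- def changingkeys(a):
--   # Divide and conquer: the number of adjacent changes in s[i:j] is the number
--   # of changes in each half plus one if the characters at the split boundary differ.
--   s = a.lower()
--   if not s:
--     return 0
--   def go(i, j):
--     if j - i <= 1: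
--       return 0
--     m = (i + j) // 2
--     return go(i, m) + go(m, j) + (s[m-1] != s[m])
--   return go(0, len(s))
-- ===== Notes on version B (the rewrite author's own statement) =====
-- stated objective: alternative
-- what changed: B counts adjacent case-insensitive changes by divide and conquer on index ranges (changes in a range = changes in each half + 1 if the boundary pair differs), instead of A's single linear pass that tracks a previous-character variable and a counter.
import Mathlib
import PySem

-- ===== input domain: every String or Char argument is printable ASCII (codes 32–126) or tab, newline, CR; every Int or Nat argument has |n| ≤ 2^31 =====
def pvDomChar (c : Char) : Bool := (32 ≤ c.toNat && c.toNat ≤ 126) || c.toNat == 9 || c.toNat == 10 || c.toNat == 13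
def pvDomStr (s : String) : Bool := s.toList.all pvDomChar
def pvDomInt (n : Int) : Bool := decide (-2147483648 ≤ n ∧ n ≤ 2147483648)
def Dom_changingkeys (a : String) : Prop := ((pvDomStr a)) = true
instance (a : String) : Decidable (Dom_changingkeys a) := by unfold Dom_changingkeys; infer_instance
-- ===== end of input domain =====

-- B counts the changes by divide and conquer on index ranges (half + half + boundary pair)
-- instead of A's linear previous-character/counter loop; alternative decomposition, same cost.

-- ===== PORT A =====
def changingkeys (a : String) : Int :=
  ((PySem.List.enumerate (PySem.Str.lower a).toList).foldl
    (fun (st : Char × Int) ic =>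
      if ic.1 = 0 then (ic.2, st.2)
      else if ic.2 ≠ st.1 then (ic.2, st.2 + 1)
      else st)
    ('x', 0)).2

-- ===== PORT B =====
/-- changes inside `s[i:j]`: zero for ranges of length ≤ 1, else split at the midpoint
    and add 1 when the two characters adjacent to the split differ (indices are always
    in range at every call site, so `getD` is exact for Python's `s[m-1]`, `s[m]`). -/
def pvGo (s : List Char) (i j : Nat) : Int :=
  if j - i ≤ 1 then 0
  else
    pvGo s i ((i + j) / 2) + pvGo s ((i + j) / 2) j +
      (if s.getD ((i + j) / 2 - 1) 'x' ≠ s.getD ((i + j) / 2) 'x' then 1 else 0)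
termination_by j - i
decreasing_by all_goals omega

def changingkeys_alt (a : String) : Int :=
  let s := (PySem.Str.lower a).toList
  if s = [] then 0 else pvGo s 0 s.length

-- ===== PRECONDITION & SPEC =====
def Spec_changingkeys (a : String) (out : Int) : Prop := out = changingkeys_alt a
instance (a : String) (out : Int) : Decidable (Spec_changingkeys a out) := by unfold Spec_changingkeys; infer_instance

-- ===== CLAIM (what is proved, stated in full; the proofs are below) =====
def Claim_equal_changingkeys : Prop := ∀ (a : String), Dom_changingkeys a → Spec_changingkeys a (changingkeys a)

-- ===== LEMMAS AND PROOFS =====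

/-- number of adjacent changes in `oc :: l` -/
def pvChanges (oc : Char) : List Char → Int
  | [] => 0
  | c :: t => (if c ≠ oc then 1 else 0) + pvChanges c t

/-- number of adjacent changes in a whole list -/
def pvP : List Char → Int
  | [] => 0
  | c :: t => pvChanges c t

/-- the slice `s[i:j]` -/
def pvSub (l : List Char) (i j : Nat) : List Char := (l.drop i).take (j - i)

/-- A's tail fold (indices ≥ 1, so the `i = 0` branch never fires) counts changes. -/
theorem pvA_tail (l : List Char) (s : Int) (hs : 1 ≤ s) (oc : Char) (out : Int) :
    ((PySem.List.enumerate l s).foldl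
      (fun (st : Char × Int) ic =>
        if ic.1 = 0 then (ic.2, st.2)
        else if ic.2 ≠ st.1 then (ic.2, st.2 + 1)
        else st)
      (oc, out)) = (l.getLastD oc, out + pvChanges oc l) := by
  induction l generalizing s oc out with
  | nil => simp [PySem.List.enumerate_nil, pvChanges]
  | cons c t ih =>
    rw [PySem.List.enumerate_cons, List.foldl_cons]
    by_cases h : c = oc
    · subst h
      rw [if_neg (by simp; omega), if_neg (by simp)]
      rw [ih (s+1) (by omega) c out]
      cases t <;> simp [pvChanges, List.getLastD]
    · rw [if_neg (by simp; omega), if_pos (by simpa using h)]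
      rw [ih (s+1) (by omega) c (out + 1)]
      refine Prod.ext ?_ ?_
      · cases t <;> simp [List.getLastD]
      · simp only [pvChanges, if_pos h]
        ring

theorem pvChanges_append (oc c : Char) (l1 l2 : List Char) :
    pvChanges oc (l1 ++ c :: l2)
      = pvChanges oc l1 + (if c ≠ l1.getLastD oc then 1 else 0) + pvChanges c l2 := by
  induction l1 generalizing oc with
  | nil => simp [pvChanges]
  | cons b t ih =>
    simp only [List.cons_append, pvChanges, List.getLastD_cons, ih b]
    ring

/-- gluing two nonempty pieces: changes across the boundary pair `b, c` add one term. -/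
theorem pvP_glue (u : List Char) (b c : Char) (v : List Char) :
    pvP (u ++ b :: c :: v)
      = pvP (u ++ [b]) + (if c ≠ b then 1 else 0) + pvP (c :: v) := by
  cases u with
  | nil => simp [pvP, pvChanges]
  | cons a t =>
    have h : t ++ b :: c :: v = (t ++ [b]) ++ c :: v := by simp
    simp only [List.cons_append, pvP, h, pvChanges_append a c (t ++ [b]) v,
      List.getLastD_concat]

theorem pvSub_split (l : List Char) (i m j : Nat) (h1 : i ≤ m) (h2 : m ≤ j) :
    pvSub l i j = pvSub l i m ++ pvSub l m j := by
  unfold pvSub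
  have hj : j - i = (m - i) + (j - m) := by omega
  rw [hj, List.take_add]
  congr 1
  rw [List.drop_drop]
  congr 2
  omega

theorem pvSub_cons (l : List Char) (i j : Nat) (hi : i < l.length) (hij : i < j) :
    pvSub l i j = l.getD i 'x' :: pvSub l (i + 1) j := by
  unfold pvSub
  rw [List.drop_eq_getElem_cons hi]
  have h : j - i = (j - (i + 1)) + 1 := by omega
  rw [h, List.take_succ_cons, List.getD_eq_getElem l 'x' hi]

theorem pvGo_eq (l : List Char) : ∀ (n i j : Nat), j - i ≤ n → j ≤ l.length →
    pvGo l i j = pvP (pvSub l i j) := by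
  intro n
  induction n with
  | zero =>
    intro i j h hj
    rw [pvGo, if_pos (by omega)]
    have : pvSub l i j = [] := by unfold pvSub; simp [(by omega : j - i = 0)]
    simp [this, pvP]
  | succ n ih =>
    intro i j h hj
    rw [pvGo]
    by_cases hsmall : j - i ≤ 1
    · rw [if_pos hsmall]
      interval_cases hd : (j - i)
      · have : pvSub l i j = [] := by unfold pvSub; simp [hd]
        simp [this, pvP]
      · rw [pvSub_cons l i j (by omega) (by omega)]
        have : pvSub l (i+1) j = [] := by
          unfold pvSub; simp [(by omega : j - (i+1) = 0)]
        simp [this, pvP, pvChanges]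
    · rw [if_neg hsmall]
      set m := (i + j) / 2 with hm
      have hbounds : i + 1 ≤ m ∧ m + 1 ≤ j := by omega
      have hA := ih i m (by omega) (by omega)
      have hB := ih m j (by omega) hj
      rw [hA, hB]
      -- decompose the slices
      have hu : pvSub l i m = pvSub l i (m-1) ++ [l.getD (m-1) 'x'] := by
        rw [pvSub_split l i (m-1) m (by omega) (by omega),
            pvSub_cons l (m-1) m (by omega) (by omega)]
        have : pvSub l m m = [] := by unfold pvSub; simp
        rw [(by omega : m - 1 + 1 = m), this]
      have hw : pvSub l m j = l.getD m 'x' :: pvSub l (m+1) j :=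
        pvSub_cons l m j (by omega) (by omega)
      have hfull : pvSub l i j
          = pvSub l i (m-1) ++ l.getD (m-1) 'x' :: l.getD m 'x' :: pvSub l (m+1) j := by
        rw [pvSub_split l i m j (by omega) (by omega), hu, hw]
        simp
      rw [hfull, pvP_glue, ← hu, hw]
      have hne : (l.getD m 'x' ≠ l.getD (m-1) 'x') ↔ (l.getD (m-1) 'x' ≠ l.getD m 'x') :=
        ne_comm
      rw [if_congr hne rfl rfl]
      ring

theorem pvKey (a : String) : changingkeys a = changingkeys_alt a := by
  unfold changingkeys changingkeys_alt
  cases h : (PySem.Str.lower a).toList with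
  | nil => simp [PySem.List.enumerate_nil]
  | cons c t =>
    rw [PySem.List.enumerate_cons, List.foldl_cons, if_pos rfl]
    rw [pvA_tail t (0 + 1) (by omega) c 0]
    have hgo := pvGo_eq (c :: t) ((c :: t).length) 0 ((c :: t).length) (by omega) (by omega)
    have hs : pvSub (c :: t) 0 (c :: t).length = c :: t := by
      unfold pvSub; simp
    simp only [if_neg (by simp : ¬(c :: t = [])), hgo, hs, pvP]
    omega

-- ===== VERDICT (by name: the statement is the Claim_ definition above) =====
theorem changingkeys_spec : Claim_equal_changingkeys := by
  intro a _
  exact pvKey a
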